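-- pv_equiv track=rewrite | github.com/PiErr0r/aoc | 2020/20.py | has_monster
-- ===== SOURCE A (Python) =====
-- def is_monster(g, pos, m):
-- 	y, x = pos
-- 	h = len(m)
-- 	w = len(m[0])
-- 	m_cnt, g_cnt = 0, 0
--
-- 	for i in range(h):
-- 		for j in range(w):
-- 			if m[i][j] == ' ':
-- 				continue
-- 			m_cnt += 1
-- 			if g[y+i][x+j] in ['#', 'o']:
-- 				g_cnt += 1
-- 	return m_cnt == g_cnt
--
-- def has_monster(img, monster):
-- 	h = len(monster)
-- 	w = len(monster[0])
--
-- 	i = 0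
-- 	while i < len(img) - h:
-- 		j = 0
-- 		while j < len(img[0]) - w:
-- 			if is_monster(img, (i, j), monster):
-- 				return True
-- 			j += 1
-- 		i += 1
-- 	return False
-- ===== SOURCE B (Python) =====
-- def has_monster(img, monster):
--     h = len(monster)
--     w = len(monster[0])
--     if len(img) - h <= 0:
--         return False
--     candidates = [(i, j) for i in range(len(img) - h)
--                          for j in range(len(img[0]) - w)]
--     for di, row in enumerate(monster):
--         for dj, c in enumerate(row):
--             if c != ' ':
--                 candidates = [(i, j) for (i, j) in candidates
--                               if img[i + di][j + dj] in '#o']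
--     return bool(candidates)
-- ===== Notes on version B (the rewrite author's own statement) =====
-- stated objective: alternative
-- what changed: A slides over every start position and, per position, rescans the whole monster rectangle comparing two running counts; B inverts the loops: it builds the list of all candidate start positions once and then, for each non-space monster cell, filters the surviving candidate set by that single cell, answering whether any candidate survives all passes.
-- outside the precondition, e.g. on has_monster(['oo', '', 'o'], ['o']): A returns True, B raises IndexError; on has_monster(['##', '#', '##'], ['#']): A returns True, B returns True
import Mathlib
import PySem

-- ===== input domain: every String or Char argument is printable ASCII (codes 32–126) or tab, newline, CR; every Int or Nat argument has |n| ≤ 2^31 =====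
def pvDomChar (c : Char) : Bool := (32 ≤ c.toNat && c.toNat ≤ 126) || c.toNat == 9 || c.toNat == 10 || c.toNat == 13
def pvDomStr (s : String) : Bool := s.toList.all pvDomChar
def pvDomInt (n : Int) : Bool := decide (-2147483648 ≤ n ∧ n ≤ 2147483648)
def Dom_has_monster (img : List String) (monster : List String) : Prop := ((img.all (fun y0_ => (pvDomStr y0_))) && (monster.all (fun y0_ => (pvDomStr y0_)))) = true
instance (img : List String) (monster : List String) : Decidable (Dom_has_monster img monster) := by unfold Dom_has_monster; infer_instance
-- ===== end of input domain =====

-- B inverts A's loops: instead of testing each start position against the whole monster with a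
-- count comparison, it keeps a shrinking candidate-position list filtered once per non-space
-- monster cell (objective: alternative).

-- ===== PORT A =====
-- is_monster(g, (y, x), m); m[i][j] and g[y+i][x+j] are indexed with a default character —
-- exact wherever the indices are in range, which Pre_has_monster guarantees for every access made.
def is_monster_port (g : List String) (y : Int) (x : Int) (m : List String) : Bool :=
  let h : Int := m.length
  let w : Int := (((PySem.List.pyGet? m 0).getD "").toList.length : Int)
  let p : Int × Int :=
    (PySem.List.pyRange 0 h 1).foldl (fun (p : Int × Int) i =>
      (PySem.List.pyRange 0 w 1).foldl (fun (q : Int × Int) j =>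
        if PySem.List.pyGetD ((PySem.List.pyGet? m i).getD "").toList j ' ' == ' ' then q
        else (q.1 + 1,
          if ['#', 'o'].contains
              (PySem.List.pyGetD ((PySem.List.pyGet? g (y + i)).getD "").toList (x + j) ' ')
          then q.2 + 1 else q.2)) p) ((0 : Int), (0 : Int))
  p.1 == p.2

-- the two while-loops with the early `return True` are ported as `any` over the same index ranges
def has_monster (img : List String) (monster : List String) : Bool :=
  let h : Int := monster.length
  let w : Int := (((PySem.List.pyGet? monster 0).getD "").toList.length : Int)
  (PySem.List.pyRange 0 ((img.length : Int) - h) 1).any (fun i =>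
    (PySem.List.pyRange 0 ((((PySem.List.pyGet? img 0).getD "").toList.length : Int) - w) 1).any (fun j =>
      is_monster_port img i j monster))

-- ===== PORT B =====
-- candidate-position list, filtered once per non-space monster cell; `bool(candidates)` = not isEmpty
def has_monster_alt (img : List String) (monster : List String) : Bool :=
  let h : Int := monster.length
  let w : Int := (((PySem.List.pyGet? monster 0).getD "").toList.length : Int)
  if (img.length : Int) - h ≤ 0 then false
  else
    let cand0 : List (Int × Int) :=
      (PySem.List.pyRange 0 ((img.length : Int) - h) 1).flatMap (fun i =>
        (PySem.List.pyRange 0 ((((PySem.List.pyGet? img 0).getD "").toList.length : Int) - w) 1).map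
          (fun j => (i, j)))
    let cand : List (Int × Int) :=
      (PySem.List.enumerate monster).foldl (fun cs p =>
        (PySem.List.enumerate p.2.toList).foldl (fun cs q =>
          if !(q.2 == ' ') then
            cs.filter (fun ij => ("#o".toList).contains
              (PySem.List.pyGetD ((PySem.List.pyGet? img (ij.1 + p.1)).getD "").toList (ij.2 + q.1) ' '))
          else cs) cs) cand0
    !cand.isEmpty

-- ===== PRECONDITION & SPEC =====
-- Pre_ excludes the empty monster (A raises IndexError on monster[0]) and ragged grids: when the
-- position scan can actually run (img taller than the monster and wider than its first row) it
-- requires all monster rows of equal width and no img row shorter than the first, since on ragged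
-- inputs A's m[i][j] / g[y+i][x+j] may raise IndexError; this also excludes some ragged shapes on
-- which A happens to return before reaching a short row (cited).
def Pre_has_monster (img : List String) (monster : List String) : Prop :=
  monster ≠ [] ∧
  ((img.length : Int) ≤ (monster.length : Int) ∨
   (img.headD "").toList.length ≤ (monster.headD "").toList.length ∨
   ((∀ r ∈ monster, r.toList.length = (monster.headD "").toList.length) ∧
    (∀ r ∈ img, (img.headD "").toList.length ≤ r.toList.length)))
instance (img : List String) (monster : List String) : Decidable (Pre_has_monster img monster) := by
  unfold Pre_has_monster; infer_instance

def pvWitness_has_monster : List String × List String := (["##", "##", "##"], ["#"])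

def Spec_has_monster (img : List String) (monster : List String) (out : Bool) : Prop := out = has_monster_alt img monster
instance (img : List String) (monster : List String) (out : Bool) : Decidable (Spec_has_monster img monster out) := by unfold Spec_has_monster; infer_instance

-- ===== CLAIM (what is proved, stated in full; the proofs are below) =====
def Claim_equal_has_monster : Prop := ∀ (img : List String) (monster : List String), Dom_has_monster img monster → Pre_has_monster img monster → Spec_has_monster img monster (has_monster img monster)

-- ===== LEMMAS AND PROOFS =====

-- the count-pair step of A's is_monster, abstracted
def cntStep {β : Type} (skip good : β → Bool) (q : Int × Int) (j : β) : Int × Int :=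
  if skip j then q else (q.1 + 1, if good j then q.2 + 1 else q.2)

theorem cntStep_mono {β : Type} (skip good : β → Bool) (L : List β) :
    ∀ a b : Int, b ≤ a → (L.foldl (cntStep skip good) (a, b)).2 ≤ (L.foldl (cntStep skip good) (a, b)).1 := by
  induction L with
  | nil => intro a b h; simpa using h
  | cons x L ih =>
    intro a b h
    simp only [List.foldl_cons, cntStep]
    split_ifs with h1 h2
    · exact ih a b h
    · exact ih (a + 1) (b + 1) (by omega)
    · exact ih (a + 1) b (by omega)

theorem cntStep_iff {β : Type} (skip good : β → Bool) (L : List β) :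
    ∀ a b : Int, b ≤ a →
      ((L.foldl (cntStep skip good) (a, b)).1 = (L.foldl (cntStep skip good) (a, b)).2 ↔
        (a = b ∧ ∀ x ∈ L, skip x = false → good x = true)) := by
  induction L with
  | nil => intro a b h; simp
  | cons x L ih =>
    intro a b h
    simp only [List.foldl_cons, cntStep]
    split_ifs with h1 h2
    · rw [ih a b h]
      constructor
      · rintro ⟨hab, hall⟩
        exact ⟨hab, by intro z hz; rcases List.mem_cons.mp hz with hz | hz; · intro hc; simp [hz, h1] at hc
                       · exact hall z hz⟩
      · rintro ⟨hab, hall⟩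
        exact ⟨hab, fun z hz => hall z (List.mem_cons_of_mem _ hz)⟩
    · rw [ih (a + 1) (b + 1) (by omega)]
      constructor
      · rintro ⟨hab, hall⟩
        refine ⟨by omega, ?_⟩
        intro z hz; rcases List.mem_cons.mp hz with hz | hz
        · intro _; subst hz; exact h2
        · exact hall z hz
      · rintro ⟨hab, hall⟩
        exact ⟨by omega, fun z hz => hall z (List.mem_cons_of_mem _ hz)⟩
    · rw [ih (a + 1) b (by omega)]
      constructor
      · rintro ⟨hab, _⟩; omega
      · rintro ⟨hab, hall⟩
        exact absurd (hall x (List.mem_cons_self) (by simpa using h1)) (by simpa using h2)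

-- A's double fold: count equality ↔ every non-skipped cell is good
theorem double_fold_iff {α β : Type} (inner : α → List β) (skip good : α → β → Bool) (R : List α) :
    ∀ a b : Int, b ≤ a →
      ((R.foldl (fun p i => (inner i).foldl (cntStep (skip i) (good i)) p) (a, b)).1 =
       (R.foldl (fun p i => (inner i).foldl (cntStep (skip i) (good i)) p) (a, b)).2 ↔
        (a = b ∧ ∀ i ∈ R, ∀ j ∈ inner i, skip i j = false → good i j = true)) := by
  induction R with
  | nil => intro a b h; simp
  | cons r R ih =>
    intro a b h
    simp only [List.foldl_cons]
    have hm := cntStep_mono (skip r) (good r) (inner r) a b h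
    rcases hfold : (inner r).foldl (cntStep (skip r) (good r)) (a, b) with ⟨a', b'⟩
    rw [hfold] at hm
    have hiff := cntStep_iff (skip r) (good r) (inner r) a b h
    rw [hfold] at hiff
    rw [ih a' b' hm]
    constructor
    · rintro ⟨hab, hall⟩
      have := hiff.mp hab
      exact ⟨this.1, by
        intro i hi
        rcases List.mem_cons.mp hi with hi | hi
        · subst hi; exact this.2
        · exact hall i hi⟩
    · rintro ⟨hab, hall⟩
      refine ⟨hiff.mpr ⟨hab, hall r List.mem_cons_self⟩, ?_⟩
      exact fun i hi => hall i (List.mem_cons_of_mem _ hi)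

-- B's filter fold, one level: membership in the result
theorem mem_filter_fold {α β : Type} (keep : β → Bool) (good : β → α → Bool) (L : List β) :
    ∀ (cs : List α) (x : α),
      (x ∈ L.foldl (fun cs j => if keep j then cs.filter (good j) else cs) cs ↔
        (x ∈ cs ∧ ∀ j ∈ L, keep j = true → good j x = true)) := by
  induction L with
  | nil => intro cs x; simp
  | cons b L ih =>
    intro cs x
    simp only [List.foldl_cons]
    by_cases hk : keep b = true
    · rw [if_pos hk, ih]
      simp only [List.mem_filter]
      constructor
      · rintro ⟨⟨hx, hg⟩, hall⟩
        exact ⟨hx, by intro j hj; rcases List.mem_cons.mp hj with hj | hj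
                      · subst hj; intro _; exact hg
                      · exact hall j hj⟩
      · rintro ⟨hx, hall⟩
        exact ⟨⟨hx, hall b List.mem_cons_self hk⟩, fun j hj => hall j (List.mem_cons_of_mem _ hj)⟩
    · rw [if_neg hk, ih]
      constructor
      · rintro ⟨hx, hall⟩
        exact ⟨hx, by intro j hj; rcases List.mem_cons.mp hj with hj | hj
                      · subst hj; intro hc; exact absurd hc hk
                      · exact hall j hj⟩
      · rintro ⟨hx, hall⟩
        exact ⟨hx, fun j hj => hall j (List.mem_cons_of_mem _ hj)⟩

-- B's nested filter fold: membership in the result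
theorem mem_filter_fold₂ {α β γ : Type} (inner : β → List γ) (keep : β → γ → Bool)
    (good : β → γ → α → Bool) (R : List β) :
    ∀ (cs : List α) (x : α),
      (x ∈ R.foldl (fun cs i => (inner i).foldl
          (fun cs j => if keep i j then cs.filter (good i j) else cs) cs) cs ↔
        (x ∈ cs ∧ ∀ i ∈ R, ∀ j ∈ inner i, keep i j = true → good i j x = true)) := by
  induction R with
  | nil => intro cs x; simp
  | cons r R ih =>
    intro cs x
    simp only [List.foldl_cons]
    rw [ih, mem_filter_fold]
    constructor
    · rintro ⟨⟨hx, hr⟩, hall⟩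
      exact ⟨hx, by intro i hi; rcases List.mem_cons.mp hi with hi | hi
                    · subst hi; exact hr
                    · exact hall i hi⟩
    · rintro ⟨hx, hall⟩
      exact ⟨⟨hx, hall r List.mem_cons_self⟩, fun i hi => hall i (List.mem_cons_of_mem _ hi)⟩

theorem fold_nil_eq_nil {α β γ : Type} (inner : β → List γ) (keep : β → γ → Bool)
    (good : β → γ → α → Bool) (R : List β) :
    R.foldl (fun cs i => (inner i).foldl
        (fun cs j => if keep i j then cs.filter (good i j) else cs) cs) ([] : List α) = [] := by
  rw [List.eq_nil_iff_forall_not_mem]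
  intro x hx
  rw [mem_filter_fold₂] at hx
  exact absurd hx.1 (List.not_mem_nil)

theorem bnot_isEmpty_iff {α : Type} (l : List α) : ((!l.isEmpty) = true ↔ ∃ x, x ∈ l) := by
  cases l <;> simp

-- per-position: A's count test ↔ the per-cell condition of B's filters, given a rectangular monster
theorem per_position (img : List String) (monster : List String) (i j : Int)
    (hrect : ∀ r ∈ monster, r.toList.length = ((PySem.List.pyGet? monster 0).getD "").toList.length) :
    (is_monster_port img i j monster = true ↔
      ∀ p ∈ PySem.List.enumerate monster, ∀ q ∈ PySem.List.enumerate p.2.toList,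
        (q.2 == ' ') = false →
        (("#o".toList).contains
          (PySem.List.pyGetD ((PySem.List.pyGet? img (i + p.1)).getD "").toList (j + q.1) ' ')) = true) := by
  have hs : ("#o".toList) = ['#', 'o'] := by decide
  simp only [is_monster_port, hs]
  rw [beq_iff_eq]
  refine Iff.trans
    (double_fold_iff
      (fun _ : Int => PySem.List.pyRange 0 ((((PySem.List.pyGet? monster 0).getD "").toList.length : Int)) 1)
      (fun i' j' => PySem.List.pyGetD ((PySem.List.pyGet? monster i').getD "").toList j' ' ' == ' ')
      (fun i' j' => ['#', 'o'].contains
        (PySem.List.pyGetD ((PySem.List.pyGet? img (i + i')).getD "").toList (j + j') ' '))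
      (PySem.List.pyRange 0 (monster.length : Int) 1) 0 0 le_rfl) ?_
  constructor
  · rintro ⟨-, hA⟩
    intro p hp q hq hne'
    rw [PySem.List.mem_enumerate_iff] at hp hq
    obtain ⟨k, hk, hp⟩ := hp
    obtain ⟨l, hl, hq⟩ := hq
    subst hp
    subst hq
    simp only at hne' ⊢
    have h1 : ((0 : Int) + (k : Int)) ∈ PySem.List.pyRange 0 (monster.length : Int) 1 := by
      rw [PySem.List.mem_pyRange_one]; omega
    have hlw : l < ((PySem.List.pyGet? monster 0).getD "").toList.length := by
      rw [← hrect monster[k] (List.getElem_mem hk)]; exact hl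
    have h2 : ((0 : Int) + (l : Int)) ∈ PySem.List.pyRange 0
        ((((PySem.List.pyGet? monster 0).getD "").toList.length : Int)) 1 := by
      rw [PySem.List.mem_pyRange_one]; omega
    have hmk : (PySem.List.pyGet? monster ((0 : Int) + (k : Int))).getD "" = monster[k] := by
      simp only [zero_add, PySem.List.pyGet?_natCast, List.getElem?_eq_getElem hk,
        Option.getD_some]
    have hskip : (PySem.List.pyGetD ((PySem.List.pyGet? monster ((0 : Int) + (k : Int))).getD "").toList
        ((0 : Int) + (l : Int)) ' ' == ' ') = false := by
      rw [hmk]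
      simp only [zero_add, PySem.List.pyGetD_natCast, List.getD_eq_getElem _ _ hl]
      simpa using hne'
    have := hA _ h1 _ h2 hskip
    simpa using this
  · intro hB
    refine ⟨rfl, ?_⟩
    intro i' hi' j' hj' hskip
    rw [PySem.List.mem_pyRange_one] at hi' hj'
    have hkn : i'.toNat < monster.length := by omega
    have hrw : (PySem.List.pyGet? monster i').getD "" = monster[i'.toNat] := by
      rw [PySem.List.pyGet?_of_nonneg monster hi'.1]
      simp only [List.getElem?_eq_getElem hkn, Option.getD_some]
    have hql : j'.toNat < (monster[i'.toNat]).toList.length := by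
      rw [hrect _ (List.getElem_mem hkn)]; omega
    have hskip' : ((monster[i'.toNat]).toList[j'.toNat] == ' ') = false := by
      simp only at hskip
      rw [hrw] at hskip
      rwa [PySem.List.pyGetD_eq_getElem (monster[i'.toNat]).toList ' ' hj'.1 (by omega)] at hskip
    have hp : (i', monster[i'.toNat]) ∈ PySem.List.enumerate monster := by
      rw [PySem.List.mem_enumerate_iff]
      exact ⟨i'.toNat, hkn, by rw [Prod.ext_iff]; exact ⟨by omega, rfl⟩⟩
    have hq : (j', (monster[i'.toNat]).toList[j'.toNat]) ∈
        PySem.List.enumerate (monster[i'.toNat]).toList := by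
      rw [PySem.List.mem_enumerate_iff]
      exact ⟨j'.toNat, hql, by rw [Prod.ext_iff]; exact ⟨by omega, rfl⟩⟩
    have := hB _ hp _ hq hskip'
    simpa using this

theorem has_monster_spec' (img : List String) (monster : List String)
    (hpre : Pre_has_monster img monster) : has_monster img monster = has_monster_alt img monster := by
  obtain ⟨hne, hcase⟩ := hpre
  by_cases hrows : (img.length : Int) - (monster.length : Int) ≤ 0
  · simp only [has_monster, has_monster_alt, if_pos hrows]
    rw [PySem.List.pyRange_one_eq_nil (by omega)]
    simp
  · have hh : (PySem.List.pyGet? monster 0).getD "" = monster.headD "" := by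
      rw [PySem.List.pyGet?_zero, ← List.head?_eq_getElem?]
      cases monster <;> simp [List.headD]
    have hhi : (PySem.List.pyGet? img 0).getD "" = img.headD "" := by
      rw [PySem.List.pyGet?_zero, ← List.head?_eq_getElem?]
      cases img <;> simp [List.headD]
    by_cases hrect : ∀ r ∈ monster, r.toList.length = ((PySem.List.pyGet? monster 0).getD "").toList.length
    · -- main case: rectangular monster
      simp only [has_monster, has_monster_alt]
      rw [if_neg hrows, Bool.eq_iff_iff]
      have hmem := mem_filter_fold₂
        (fun p : Int × String => PySem.List.enumerate p.2.toList)
        (fun _ q => !(q.2 == ' '))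
        (fun p q (ij : Int × Int) => ("#o".toList).contains
          (PySem.List.pyGetD ((PySem.List.pyGet? img (ij.1 + p.1)).getD "").toList (ij.2 + q.1) ' '))
        (PySem.List.enumerate monster)
      constructor
      · intro hA
        rw [List.any_eq_true] at hA
        obtain ⟨i, hi, hj⟩ := hA
        rw [List.any_eq_true] at hj
        obtain ⟨j, hj, hm⟩ := hj
        rw [per_position img monster i j hrect] at hm
        rw [bnot_isEmpty_iff]
        refine ⟨(i, j), (hmem _ _).mpr ⟨?_, ?_⟩⟩
        · simp only [List.mem_flatMap, List.mem_map]
          exact ⟨i, hi, j, hj, rfl⟩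
        · intro p hp q hq hk
          exact hm p hp q hq (by simpa using hk)
      · intro hB
        rw [bnot_isEmpty_iff] at hB
        obtain ⟨x, hx⟩ := hB
        rw [hmem] at hx
        obtain ⟨hx0, hall⟩ := hx
        simp only [List.mem_flatMap, List.mem_map] at hx0
        obtain ⟨i, hi, j, hj, hxij⟩ := hx0
        subst hxij
        rw [List.any_eq_true]
        refine ⟨i, hi, ?_⟩
        rw [List.any_eq_true]
        refine ⟨j, hj, ?_⟩
        rw [per_position img monster i j hrect]
        intro p hp q hq hne'
        exact hall p hp q hq (by simpa using hne')
    · -- ragged monster excluded unless the column range is empty: then both scans see no position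
      have hnarrow : (img.headD "").toList.length ≤ (monster.headD "").toList.length := by
        rcases hcase with h | h | ⟨hr, _⟩
        · omega
        · exact h
        · exact absurd (by rw [hh]; exact hr) hrect
      have hC : PySem.List.pyRange 0 ((((PySem.List.pyGet? img 0).getD "").toList.length : Int) -
          (((PySem.List.pyGet? monster 0).getD "").toList.length : Int)) 1 = [] :=
        PySem.List.pyRange_one_eq_nil (by rw [hh, hhi]; omega)
      simp only [has_monster, has_monster_alt]
      rw [if_neg hrows, hC]
      have hfm : (PySem.List.pyRange 0 ((img.length : Int) - (monster.length : Int)) 1).flatMap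
          (fun i => (([] : List Int)).map (fun j => (i, j))) = ([] : List (Int × Int)) := by
        simp
      rw [hfm, fold_nil_eq_nil]
      simp

-- ===== VERDICT (by name: the statement is the Claim_ definition above) =====
theorem has_monster_spec : Claim_equal_has_monster := by
  intro img monster _ hpre
  exact has_monster_spec' img monster hpre
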